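-- pv_equiv track=rewrite | github.com/nzk0de/language_learning | language_app/app/quality_checker.py | _has_wiki_artifacts
-- ===== SOURCE A (Python) =====
-- def _has_wiki_artifacts(sentence: str) -> bool:
--     """Check for common Wikipedia artifacts."""
--     wiki_artifacts = [
--         "siehe auch",  # German "see also"
--         "see also",
--         "category:",
--         "kategorie:",
--         "thumb|",
--         "px|",
--         "left|",
--         "right|",
--         "center|",
--         "{{",
--         "}}",
--         "[[",
--         "]]",
--         "file:",
--         "image:",
--         "datei:",
--         "bild:",
--     ]
--
--     sentence_lower = sentence.lower()
--     for artifact in wiki_artifacts: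
--         if artifact in sentence_lower:
--             return True
--     return False
-- ===== SOURCE B (Python) =====
-- _COLON_STEMS = ("category", "kategorie", "file", "image", "datei", "bild")
-- _PIPE_STEMS = ("thumb", "px", "left", "right", "center")
--
-- def _has_wiki_artifacts(sentence: str) -> bool:
--     """Delimiter-keyed scan: each artifact is recognized at its delimiter
--     character (':', '|', '{', '}', '[', ']', ' ') by checking the stem just
--     before / after it, instead of one full substring search per artifact."""
--     s = sentence.lower()
--     for i, ch in enumerate(s):
--         if ch == ':':
--             if s.endswith(_COLON_STEMS, 0, i):
--                 return True
--         elif ch == '|':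
--             if s.endswith(_PIPE_STEMS, 0, i):
--                 return True
--         elif ch in '{}[]':
--             if i + 1 < len(s) and s[i + 1] == ch:
--                 return True
--         elif ch == ' ':
--             if s.endswith("siehe", 0, i) and s.startswith("auch", i + 1):
--                 return True
--             if s.endswith("see", 0, i) and s.startswith("also", i + 1):
--                 return True
--     return False
-- ===== Notes on version B (the rewrite author's own statement) =====
-- stated objective: alternative
-- what changed: B replaces A's per-artifact full-string membership scans with one scan over the lowercased sentence that is keyed by delimiter characters (':', '|', '{', '}', '[', ']', ' '): at each delimiter it checks the stem just before (s.endswith with a tuple of stems) and, for two-word artifacts, the word just after, so no artifact string is ever searched for as a whole.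
import Mathlib
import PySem

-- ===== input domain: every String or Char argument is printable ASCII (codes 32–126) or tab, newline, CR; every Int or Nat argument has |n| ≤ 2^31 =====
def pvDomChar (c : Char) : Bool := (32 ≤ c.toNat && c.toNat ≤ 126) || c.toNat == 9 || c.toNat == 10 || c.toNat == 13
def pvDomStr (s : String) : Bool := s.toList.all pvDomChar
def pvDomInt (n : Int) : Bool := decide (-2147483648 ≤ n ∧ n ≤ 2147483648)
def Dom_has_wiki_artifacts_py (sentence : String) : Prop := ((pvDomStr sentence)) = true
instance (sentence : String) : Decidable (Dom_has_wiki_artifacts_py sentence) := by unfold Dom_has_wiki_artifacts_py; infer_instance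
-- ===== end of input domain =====

-- B recognizes each artifact at its delimiter character in one scan with before/after stem checks; alternative, not faster.

-- ===== PORT A =====
def wikiArtifactsA : List String :=
  ["siehe auch", "see also", "category:", "kategorie:", "thumb|", "px|",
   "left|", "right|", "center|", "{{", "}}", "[[", "]]",
   "file:", "image:", "datei:", "bild:"]

-- the 'for artifact in …: if artifact in sentence_lower: return True' loop
def wikiLoopA : List String → String → Bool
  | [], _ => false
  | a :: rest, sl => if PySem.Str.isIn a sl then true else wikiLoopA rest sl

def has_wiki_artifacts_py (sentence : String) : Bool :=
  wikiLoopA wikiArtifactsA (PySem.Str.lower sentence)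

-- ===== PORT B =====
def colonStems : List String := ["category", "kategorie", "file", "image", "datei", "bild"]
def pipeStems : List String := ["thumb", "px", "left", "right", "center"]

-- Source B's per-position delimiter test at position i of s: 'pre' holds s[:i] REVERSED
-- (so Python's s.endswith(w, 0, i) is w.toList.reverse.isPrefixOf pre), 'rest' holds
-- s[i+1:] (so s.startswith(v, i+1) is v.toList.isPrefixOf rest, and
-- 'i+1 < len(s) and s[i+1] == ch' is rest.head? == some c).
def wikiLocalB (c : Char) (pre rest : List Char) : Bool :=
  if c = ':' then colonStems.any (fun w => List.isPrefixOf w.toList.reverse pre)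
  else if c = '|' then pipeStems.any (fun w => List.isPrefixOf w.toList.reverse pre)
  else if c = '{' ∨ c = '}' ∨ c = '[' ∨ c = ']' then rest.head? == some c
  else if c = ' ' then
    (List.isPrefixOf "siehe".toList.reverse pre && List.isPrefixOf "auch".toList rest)
    || (List.isPrefixOf "see".toList.reverse pre && List.isPrefixOf "also".toList rest)
  else false

-- Source B's 'for i, ch in enumerate(s)' loop, carrying the reversed prefix
def wikiScanB (pre : List Char) : List Char → Bool
  | [] => false
  | c :: rest => wikiLocalB c pre rest || wikiScanB (c :: pre) rest

def has_wiki_artifacts_py_alt (sentence : String) : Bool :=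
  wikiScanB [] (PySem.Str.lower sentence).toList

-- ===== PRECONDITION & SPEC =====
def Spec_has_wiki_artifacts_py (sentence : String) (out : Bool) : Prop := out = has_wiki_artifacts_py_alt sentence
instance (sentence : String) (out : Bool) : Decidable (Spec_has_wiki_artifacts_py sentence out) := by unfold Spec_has_wiki_artifacts_py; infer_instance

-- ===== CLAIM (what is proved, stated in full; the proofs are below) =====
def Claim_equal_has_wiki_artifacts_py : Prop := ∀ (sentence : String), Dom_has_wiki_artifacts_py sentence → Spec_has_wiki_artifacts_py sentence (has_wiki_artifacts_py sentence)

-- ===== LEMMAS AND PROOFS =====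

-- each artifact decomposed as (before-stem, delimiter, after-stem)
def wikiTrips : List (List Char × Char × List Char) :=
  [("siehe".toList, ' ', "auch".toList), ("see".toList, ' ', "also".toList),
   ("category".toList, ':', []), ("kategorie".toList, ':', []),
   ("thumb".toList, '|', []), ("px".toList, '|', []),
   ("left".toList, '|', []), ("right".toList, '|', []), ("center".toList, '|', []),
   ([], '{', ['{']), ([], '}', ['}']), ([], '[', ['[']), ([], ']', [']']),
   ("file".toList, ':', []), ("image".toList, ':', []),
   ("datei".toList, ':', []), ("bild".toList, ':', [])]

lemma trips_eq_arts :
    wikiTrips.map (fun t => t.1 ++ t.2.1 :: t.2.2) = wikiArtifactsA.map String.toList := by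
  decide

lemma wikiLoopA_iff (arts : List String) (sl : String) :
    wikiLoopA arts sl = true ↔ ∃ a ∈ arts, a.toList <:+: sl.toList := by
  induction arts with
  | nil => simp [wikiLoopA]
  | cons a rest ih =>
      simp only [wikiLoopA]
      split_ifs with h
      · constructor
        · intro _; exact ⟨a, List.mem_cons_self, (PySem.Str.isIn_iff_infix a sl).mp h⟩
        · intro _; rfl
      · have hni : ¬ a.toList <:+: sl.toList := fun hc => h ((PySem.Str.isIn_iff_infix a sl).mpr hc)
        rw [ih]
        constructor
        · rintro ⟨b, hb, hi⟩; exact ⟨b, List.mem_cons_of_mem _ hb, hi⟩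
        · rintro ⟨b, hb, hi⟩
          rcases List.mem_cons.mp hb with rfl | hb'
          · exact absurd hi hni
          · exact ⟨b, hb', hi⟩

-- an occurrence of w ++ d :: v is exactly a split of s at a d with w just before and v just after
lemma infix_triple (w : List Char) (d : Char) (v s : List Char) :
    (w ++ d :: v) <:+: s ↔ ∃ x y, s = x ++ d :: y ∧ w <:+ x ∧ v <+: y := by
  constructor
  · rintro ⟨p, q, rfl⟩
    exact ⟨p ++ w, v ++ q, by simp, ⟨p, rfl⟩, ⟨q, rfl⟩⟩
  · rintro ⟨x, y, rfl, ⟨p, rfl⟩, ⟨q, rfl⟩⟩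
    exact ⟨p, q, by simp⟩

lemma suffix_reverse (w pre : List Char) :
    w <:+ pre.reverse ↔ List.isPrefixOf w.reverse pre = true := by
  rw [List.isPrefixOf_iff_prefix, ← List.reverse_reverse pre, List.reverse_prefix,
    List.reverse_reverse]

lemma prefix_isPrefixOf (v rest : List Char) :
    v <+: rest ↔ List.isPrefixOf v rest = true := (List.isPrefixOf_iff_prefix).symm

lemma singleton_prefix_head? (a : Char) (l : List Char) :
    [a] <+: l ↔ l.head? = some a := by
  cases l with
  | nil => simp
  | cons b t => simp [List.cons_prefix_cons, eq_comm]

lemma wikiLocalB_iff (c : Char) (pre rest : List Char) :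
    wikiLocalB c pre rest = true ↔
      ∃ t ∈ wikiTrips, t.2.1 = c ∧ t.1 <:+ pre.reverse ∧ t.2.2 <+: rest := by
  simp only [wikiTrips, List.exists_mem_cons_iff, List.not_mem_nil, false_and,
    exists_false, or_false, suffix_reverse, prefix_isPrefixOf, List.isPrefixOf, List.reverse_nil, true_and, and_true]
  unfold wikiLocalB
  split_ifs with h1 h2 h3 h4
  · subst h1; simp [colonStems]; try tauto
  · subst h2; simp [pipeStems]; try tauto
  · rcases h3 with rfl | rfl | rfl | rfl <;> simp [singleton_prefix_head?]
  · subst h4; simp; try tauto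
  · simp only [not_or] at h3
    obtain ⟨n1, n2, n3, n4⟩ := h3
    simp [Ne.symm h1, Ne.symm h2, Ne.symm h4, Ne.symm n1, Ne.symm n2, Ne.symm n3, Ne.symm n4]

-- loop invariant: wikiScanB pre rest finds exactly the artifact occurrences whose
-- delimiter lies within rest (position ≥ pre.length in the whole string pre.reverse ++ rest)
lemma wikiScanB_iff (rest pre : List Char) :
    wikiScanB pre rest = true ↔
      ∃ t ∈ wikiTrips, ∃ x y, pre.reverse ++ rest = x ++ t.2.1 :: y ∧
        pre.length ≤ x.length ∧ t.1 <:+ x ∧ t.2.2 <+: y := by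
  induction rest generalizing pre with
  | nil =>
      simp only [wikiScanB, List.append_nil]
      constructor
      · intro h; cases h
      · rintro ⟨t, _, x, y, heq, hlen, _, _⟩
        have := congrArg List.length heq
        simp at this
        omega
  | cons c rest' ih =>
      simp only [wikiScanB, Bool.or_eq_true, wikiLocalB_iff, ih (c :: pre),
        List.reverse_cons, List.append_assoc, List.singleton_append, List.length_cons]
      constructor
      · rintro (⟨t, ht, hd, hw, hv⟩ | ⟨t, ht, x, y, heq, hlen, hw, hv⟩)
        · exact ⟨t, ht, pre.reverse, rest', by rw [hd], by simp, hw, hv⟩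
        · exact ⟨t, ht, x, y, heq, by omega, hw, hv⟩
      · rintro ⟨t, ht, x, y, heq, hlen, hw, hv⟩
        by_cases hx : x.length = pre.length
        · have hx' : pre.reverse.length = x.length := by simp [hx]
          obtain ⟨hxp, hdy⟩ := List.append_inj heq hx'
          obtain ⟨hd, hy⟩ := List.cons.inj hdy
          exact Or.inl ⟨t, ht, hd.symm, hxp ▸ hw, hy ▸ hv⟩
        · exact Or.inr ⟨t, ht, x, y, heq, by omega, hw, hv⟩
      

-- ===== VERDICT (by name: the statement is the Claim_ definition above) =====
theorem has_wiki_artifacts_py_spec : Claim_equal_has_wiki_artifacts_py := by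
  intro sentence _
  unfold Spec_has_wiki_artifacts_py has_wiki_artifacts_py has_wiki_artifacts_py_alt
  rw [Bool.eq_iff_iff, wikiLoopA_iff, wikiScanB_iff]
  constructor
  · rintro ⟨a, ha, hinf⟩
    have : a.toList ∈ wikiTrips.map (fun t => t.1 ++ t.2.1 :: t.2.2) := by
      rw [trips_eq_arts]; exact List.mem_map_of_mem ha
    obtain ⟨t, ht, hteq⟩ := List.mem_map.mp this
    rw [← hteq, infix_triple] at hinf
    obtain ⟨x, y, hs, hw, hv⟩ := hinf
    exact ⟨t, ht, x, y, by simpa using hs, Nat.zero_le _, hw, hv⟩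
  · rintro ⟨t, ht, x, y, hs, _, hw, hv⟩
    have hmem : (t.1 ++ t.2.1 :: t.2.2) ∈ wikiArtifactsA.map String.toList := by
      rw [← trips_eq_arts]; exact List.mem_map_of_mem ht
    obtain ⟨a, ha, haeq⟩ := List.mem_map.mp hmem
    have hinf : (t.1 ++ t.2.1 :: t.2.2) <:+: (PySem.Str.lower sentence).toList :=
      (infix_triple _ _ _ _).mpr ⟨x, y, by simpa using hs, hw, hv⟩
    exact ⟨a, ha, by rw [haeq]; exact hinf⟩
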